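-- pv_equiv track=rewrite | github.com/Haddox/steric_clashing_metric | scripts/design_utils.py | count_number_of_codons_in_sequence
-- ===== SOURCE A (Python) =====
-- def count_number_of_codons_in_sequence(seq, codons):
--     """
--     Count the number of codons in an input sequence
--
--     Code for doctest:
--     >>> seq = 'GCCATGCAAGCTTTTGCT'
--     >>> codons = ['GCT', 'GCC', 'GCA', 'GCG']
--     >>> counts = count_number_of_codons_in_sequence(seq, codons)
--     >>> (counts['GCT'], counts['GCC'], counts['GCA'], counts['GCG'])
--     (2, 1, 0, 0)
--     >>> seq = 'AGCCATGCAAGCTTTTGC'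
--     >>> counts = count_number_of_codons_in_sequence(seq, codons)
--     >>> (counts['GCT'], counts['GCC'], counts['GCA'], counts['GCG'])
--     (0, 0, 1, 0)
--     """
--
--     codon_counts_dict = {
--         codon : 0
--         for codon in codons
--     }
--     seq = iter(list(seq))
--     while True:
--         try:
--             codon = ''.join([
--                 next(seq), next(seq), next(seq)
--             ])
--             if codon in codons:
--                 codon_counts_dict[codon] += 1
--         except StopIteration:
--             break
--     return codon_counts_dict
-- ===== SOURCE B (Python) =====
-- def count_number_of_codons_in_sequence(seq, codons):
--     """Tally every complete 3-char chunk once, then project onto the requested codons."""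
--     s = list(seq)
--     tally = {}
--     for i in range(0, len(s) - 2, 3):
--         codon = ''.join(s[i:i+3])
--         tally[codon] = tally.get(codon, 0) + 1
--     return {codon: tally.get(codon, 0) for codon in codons}
-- ===== Notes on version B (the rewrite author's own statement) =====
-- stated objective: faster
-- what changed: B slices the sequence into complete 3-char chunks with an index loop and builds a full Counter-style tally once, then projects the tally onto the requested codons, instead of A's iterator loop that tests each chunk for list membership and mutates a pre-initialised per-codon dict in place.
import Mathlib
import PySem

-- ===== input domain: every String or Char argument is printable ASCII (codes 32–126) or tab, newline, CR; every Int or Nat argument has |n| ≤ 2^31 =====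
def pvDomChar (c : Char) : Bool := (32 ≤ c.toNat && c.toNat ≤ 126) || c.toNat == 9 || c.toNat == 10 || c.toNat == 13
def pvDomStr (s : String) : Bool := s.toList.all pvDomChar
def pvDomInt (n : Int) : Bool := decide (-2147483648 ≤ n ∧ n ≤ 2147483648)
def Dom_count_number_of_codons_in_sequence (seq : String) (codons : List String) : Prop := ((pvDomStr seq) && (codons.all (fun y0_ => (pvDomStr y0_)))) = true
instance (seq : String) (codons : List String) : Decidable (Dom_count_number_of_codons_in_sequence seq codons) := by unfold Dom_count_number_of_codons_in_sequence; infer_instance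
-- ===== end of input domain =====

-- B replaces A's per-chunk membership test + in-place dict mutation by a one-pass chunk tally
-- (Counter-style) followed by a projection onto the requested codons; same return value everywhere.

-- ===== PORT A =====
-- the dict comprehension {codon: 0 for codon in codons}
def pvInitDict (codons : List String) : PySem.Dict String Int :=
  codons.foldl (fun d c => d.insert c 0) PySem.Dict.empty

-- the while/next()x3 loop: consumes three chars at a time, drops the incomplete tail.
-- 'codon_counts_dict[codon] += 1' only fires when codon ∈ codons, and every such codon is a key
-- of the dict, so Python's += never raises KeyError; PySem.Dict.modify is exact here.
def pvLoopA (codons : List String) : List Char → PySem.Dict String Int → PySem.Dict String Int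
  | a :: b :: c :: rest, d =>
      let codon := String.ofList [a, b, c]
      pvLoopA codons rest (if codon ∈ codons then d.modify codon 0 (· + 1) else d)
  | _, d => d

def count_number_of_codons_in_sequence (seq : String) (codons : List String) : List (String × Int) :=
  (pvLoopA codons seq.toList (pvInitDict codons)).items

-- ===== PORT B =====
def count_number_of_codons_in_sequence_alt (seq : String) (codons : List String) : List (String × Int) :=
  let s := seq.toList
  let tally := (PySem.List.pyRange 0 (PySem.List.len s - 2) 3).foldl
      (fun d i =>
        let codon := String.ofList (PySem.List.slice s (some i) (some (i + 3)))
        d.insert codon (d.getD codon 0 + 1))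
      PySem.Dict.empty
  (codons.foldl (fun d codon => d.insert codon (tally.getD codon 0)) PySem.Dict.empty).items

-- ===== PRECONDITION & SPEC =====
def Spec_count_number_of_codons_in_sequence (seq : String) (codons : List String) (out : List (String × Int)) : Prop := out = count_number_of_codons_in_sequence_alt seq codons
instance (seq : String) (codons : List String) (out : List (String × Int)) : Decidable (Spec_count_number_of_codons_in_sequence seq codons out) := by unfold Spec_count_number_of_codons_in_sequence; infer_instance

-- ===== CLAIM (what is proved, stated in full; the proofs are below) =====
def Claim_equal_count_number_of_codons_in_sequence : Prop := ∀ (seq : String) (codons : List String), Dom_count_number_of_codons_in_sequence seq codons → Spec_count_number_of_codons_in_sequence seq codons (count_number_of_codons_in_sequence seq codons)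

-- ===== LEMMAS AND PROOFS =====

-- the list of complete 3-char chunks of s, in order
def pvChunks : List Char → List String
  | a :: b :: c :: rest => String.ofList [a, b, c] :: pvChunks rest
  | _ => []

lemma pvLoopA_nomatch (codons : List String) (t : List Char)
    (h : ∀ (a b c : Char) (rest : List Char), t = a :: b :: c :: rest → False)
    (d : PySem.Dict String Int) : pvLoopA codons t d = d := by
  match t, h with
  | [], _ => rfl
  | [a], _ => rfl
  | [a, b], _ => rfl
  | a :: b :: c :: r, h => exact absurd rfl (fun x => h a b c r x)

lemma pvChunks_nomatch (t : List Char)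
    (h : ∀ (a b c : Char) (rest : List Char), t = a :: b :: c :: rest → False) :
    pvChunks t = [] := by
  match t, h with
  | [], _ => rfl
  | [a], _ => rfl
  | [a, b], _ => rfl
  | a :: b :: c :: r, h => exact absurd rfl (fun x => h a b c r x)

lemma pv_slice3 (s : List Char) (j : Nat) :
    PySem.List.slice s (some (j:Int)) (some ((j:Int)+3)) = (s.drop j).take 3 := by
  simpa using PySem.List.slice_natCast_add s j 3

-- B's index/slice loop enumerates exactly the complete 3-char chunks
lemma pv_map_range_eq_chunks (s : List Char) :
    (PySem.List.pyRange 0 (PySem.List.len s - 2) 3).map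
      (fun i => String.ofList (PySem.List.slice s (some i) (some (i + 3)))) = pvChunks s := by
  induction s using pvChunks.induct with
  | case1 a b c rest ih =>
    rw [pvChunks, ← ih]
    rw [PySem.List.pyRange_of_pos _ _ (by norm_num), PySem.List.pyRange_of_pos _ _ (by norm_num)]
    simp only [PySem.List.len_eq, List.length_cons]
    have hpos : (0:Int) < ↑(rest.length + 1 + 1 + 1) - 2 := by push_cast; omega
    rw [if_pos hpos]
    have hcnt : (((rest.length + 1 + 1 + 1 : Nat) - 2 - 0 + 3 - 1 : Int)/3).toNat
        = rest.length / 3 + 1 := by omega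
    have hcnt2 : (if (0:Int) < (rest.length:Int) - 2
          then (((rest.length:Int) - 2 - 0 + 3 - 1)/3).toNat else 0)
        = rest.length / 3 := by
      split_ifs with h
      · omega
      · omega
    rw [hcnt, hcnt2, List.range_succ_eq_map]
    simp only [List.map_cons, List.map_map]
    congr 1
    · apply List.map_congr_left
      intro k hk
      simp only [Function.comp_apply]
      rw [show (0 + 3 * ((Nat.succ k : Nat):Int)) = ((3*k+3 : Nat):Int) by push_cast; ring]
      rw [show (0 + 3 * ((k : Nat):Int)) = ((3*k : Nat):Int) by push_cast; ring]
      rw [pv_slice3, pv_slice3]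
      rw [show (a::b::c::rest).drop (3*k+3) = rest.drop (3*k) by
        simp [show 3*k+3 = 3*k+1+1+1 by omega, List.drop_succ_cons]]
  | case2 t h =>
    rw [pvChunks_nomatch t h]
    have hlen : t.length ≤ 2 := by
      match t, h with
      | [], _ => simp
      | [a], _ => simp
      | [a, b], _ => simp
      | a :: b :: c :: r, h => exact absurd rfl (fun x => h a b c r x)
    rw [PySem.List.pyRange_of_pos _ _ (by norm_num)]
    simp only [PySem.List.len_eq]
    rw [if_neg (by omega)]
    simp

-- value of a fold of inserts whose inserted value depends only on the key
lemma pv_getD_foldl_insert_fun (f : String → Int) (l : List String) :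
    ∀ (d : PySem.Dict String Int) (k : String) (d0 : Int),
      (l.foldl (fun d c => d.insert c (f c)) d).getD k d0
        = if k ∈ l then f k else d.getD k d0 := by
  induction l with
  | nil => simp
  | cons c cs ih =>
    intro d k d0
    simp only [List.foldl_cons, ih, PySem.Dict.getD_insert, List.mem_cons]
    by_cases h1 : k ∈ cs <;> by_cases h2 : k = c <;> simp [h1, h2]

-- A's loop adds, at each key of the codon list, the number of chunks equal to that key
lemma pv_getD_loopA (codons : List String) (s : List Char) :
    ∀ (d : PySem.Dict String Int) (k : String),
      (pvLoopA codons s d).getD k 0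
        = d.getD k 0 + (if k ∈ codons then ((pvChunks s).count k : Int) else 0) := by
  induction s using pvChunks.induct with
  | case1 a b c rest ih =>
    intro d k
    rw [pvLoopA, pvChunks]
    simp only [ih]
    by_cases hc : String.ofList [a,b,c] ∈ codons <;>
      by_cases he : k = String.ofList [a,b,c]
    · subst he
      rw [if_pos hc, if_pos hc, if_pos hc, List.count_cons_self,
        PySem.Dict.getD_modify_self]
      push_cast; ring
    · rw [if_pos hc, PySem.Dict.getD_modify_of_ne _ _ _ he]
      by_cases hk : k ∈ codons
      · rw [if_pos hk, if_pos hk, List.count_cons]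
        simp [Ne.symm he]
      · rw [if_neg hk, if_neg hk]
    · subst he
      simp [hc]
    · rw [if_neg hc]
      by_cases hk : k ∈ codons
      · rw [if_pos hk, if_pos hk, List.count_cons]
        simp [Ne.symm he]
      · rw [if_neg hk, if_neg hk]
  | case2 t h =>
    intro d k
    rw [pvLoopA_nomatch codons t h, pvChunks_nomatch t h]
    simp

-- A's loop never adds or removes a key (every codon it touches is already a key)
lemma pv_keys_loopA (codons : List String) (s : List Char) :
    ∀ (d : PySem.Dict String Int), (∀ c ∈ codons, d.contains c = true) →
      (pvLoopA codons s d).keys = d.keys := by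
  induction s using pvChunks.induct with
  | case1 a b c rest ih =>
    intro d hd
    rw [pvLoopA]
    by_cases hc : String.ofList [a,b,c] ∈ codons
    · rw [if_pos hc]
      rw [ih _ (by
        intro x hx
        simp only [PySem.Dict.modify, PySem.Dict.contains_insert]
        simp [hd x hx])]
      simp only [PySem.Dict.modify]
      exact PySem.Dict.keys_insert_of_contains d _ (hd _ hc)
    · rw [if_neg hc]; exact ih d hd
  | case2 t h => intro d hd; rw [pvLoopA_nomatch codons t h]

-- ===== VERDICT =====
theorem count_number_of_codons_in_sequence_spec : Claim_equal_count_number_of_codons_in_sequence := by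
  unfold Claim_equal_count_number_of_codons_in_sequence Spec_count_number_of_codons_in_sequence
  intro seq codons _
  unfold count_number_of_codons_in_sequence count_number_of_codons_in_sequence_alt
  simp only []
  set s := seq.toList with hs
  -- rewrite B's tally as a fold over the chunk list, i.e. Counter(chunks)
  have htally : (PySem.List.pyRange 0 (PySem.List.len s - 2) 3).foldl
      (fun d i =>
        let codon := String.ofList (PySem.List.slice s (some i) (some (i + 3)))
        d.insert codon (d.getD codon 0 + 1)) PySem.Dict.empty
      = PySem.Dict.counter (pvChunks s) := by
    rw [← pv_map_range_eq_chunks s, ← PySem.Dict.foldl_insert_getD_add_one_eq_counter,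
      List.foldl_map]
  rw [htally]
  -- keys of A's initial dict
  have hkinit : (pvInitDict codons).keys = PySem.Set.ofList codons := by
    unfold pvInitDict
    rw [PySem.Dict.keys_foldl_insert codons (fun _ _ => 0) PySem.Dict.empty]
    rfl
  have hcontains : ∀ c ∈ codons, (pvInitDict codons).contains c = true := by
    intro c hc
    rw [PySem.Dict.contains_iff_mem_keys, hkinit]
    exact (PySem.Set.mem_ofList codons c).mpr hc
  have hkA : (pvLoopA codons s (pvInitDict codons)).keys = PySem.Set.ofList codons := by
    rw [pv_keys_loopA codons s _ hcontains, hkinit]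
  have hkB : (codons.foldl (fun d codon =>
        d.insert codon ((PySem.Dict.counter (pvChunks s)).getD codon 0))
        PySem.Dict.empty).keys = PySem.Set.ofList codons := by
    rw [PySem.Dict.keys_foldl_insert codons
      (fun _ c => (PySem.Dict.counter (pvChunks s)).getD c 0) PySem.Dict.empty]
    rfl
  have hndA : (pvLoopA codons s (pvInitDict codons)).keys.Nodup := by
    rw [hkA]; exact PySem.Set.nodup_ofList codons
  have hndB : (codons.foldl (fun d codon =>
        d.insert codon ((PySem.Dict.counter (pvChunks s)).getD codon 0))
        PySem.Dict.empty).keys.Nodup := by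
    rw [hkB]; exact PySem.Set.nodup_ofList codons
  rw [PySem.Dict.items_eq_map_keys _ hndA 0, PySem.Dict.items_eq_map_keys _ hndB 0,
    hkA, hkB]
  apply List.map_congr_left
  intro k hk
  have hkc : k ∈ codons := (PySem.Set.mem_ofList codons k).mp hk
  rw [pv_getD_loopA codons s _ k, if_pos hkc]
  have hinit0 : (pvInitDict codons).getD k 0 = 0 := by
    unfold pvInitDict
    rw [pv_getD_foldl_insert_fun (fun _ => 0) codons]
    simp
  rw [hinit0, pv_getD_foldl_insert_fun
    (fun c => (PySem.Dict.counter (pvChunks s)).getD c 0) codons, if_pos hkc,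
    PySem.Dict.getD_counter]
  simp
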